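-- pv_equiv track=rewrite | github.com/ChiaShengRong/FarmMachinerySystem | scripts/farm_scheduler.py | optimize_field_assignment
-- ===== SOURCE A (Python) =====
-- from typing import List, Dict, Tuple
--
-- def optimize_field_assignment(fields: List[Dict], machine_count: int) -> List[List[Dict]]:
--     """优化田地分配给农机"""
--     if machine_count >= len(fields):
--         # 如果农机数量大于等于田地数量，每台农机分配一个田地
--         assignments = []
--         for i in range(machine_count):
--             if i < len(fields):
--                 assignments.append([fields[i]])
--             else:
--                 assignments.append([])
--         return assignments
--
--     # 使用贪心算法进行田地分配
--     assignments = [[] for _ in range(machine_count)]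
--     machine_loads = [0.0] * machine_count  # 每台农机的工作负载
--
--     # 按田地面积排序（大田地优先分配）
--     sorted_fields = sorted(fields, key=lambda f: f['width'] * f['height'], reverse=True)
--
--     for field in sorted_fields:
--         # 找到当前负载最小的农机
--         min_load_machine = min(range(machine_count), key=lambda i: machine_loads[i])
--
--         assignments[min_load_machine].append(field)
--         machine_loads[min_load_machine] += field['width'] * field['height']
--
--     return assignments
-- ===== SOURCE B (Python) =====
-- def optimize_field_assignment(fields, machine_count):
--     n = len(fields)
--     if machine_count >= n:
--         return [[f] for f in fields] + [[] for _ in range(machine_count - n)]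
--     assignments = [[] for _ in range(machine_count)]
--     # priority queue kept as a list of (load, machine) pairs sorted in
--     # ascending lexicographic order: the least-loaded machine (smallest load,
--     # then smallest index) is always at the front.
--     pool = [(0, i) for i in range(machine_count)]
--     for field in sorted(fields, key=lambda f: f['width'] * f['height'], reverse=True):
--         load, i = pool.pop(0)
--         assignments[i].append(field)
--         entry = (load + field['width'] * field['height'], i)
--         j = len(pool)
--         while j > 0 and entry < pool[j - 1]:
--             j -= 1
--         pool.insert(j, entry)
--     return assignments
-- ===== Notes on version B (the rewrite author's own statement) =====
-- stated objective: alternative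
-- what changed: A rescans the whole load array with min(range(m), key=...) for every field; B keeps the machines in a pool of (load, machine) pairs sorted lexicographically ascending, popping the least-loaded machine from the front in O(1) and re-inserting it in order.
import Mathlib
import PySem

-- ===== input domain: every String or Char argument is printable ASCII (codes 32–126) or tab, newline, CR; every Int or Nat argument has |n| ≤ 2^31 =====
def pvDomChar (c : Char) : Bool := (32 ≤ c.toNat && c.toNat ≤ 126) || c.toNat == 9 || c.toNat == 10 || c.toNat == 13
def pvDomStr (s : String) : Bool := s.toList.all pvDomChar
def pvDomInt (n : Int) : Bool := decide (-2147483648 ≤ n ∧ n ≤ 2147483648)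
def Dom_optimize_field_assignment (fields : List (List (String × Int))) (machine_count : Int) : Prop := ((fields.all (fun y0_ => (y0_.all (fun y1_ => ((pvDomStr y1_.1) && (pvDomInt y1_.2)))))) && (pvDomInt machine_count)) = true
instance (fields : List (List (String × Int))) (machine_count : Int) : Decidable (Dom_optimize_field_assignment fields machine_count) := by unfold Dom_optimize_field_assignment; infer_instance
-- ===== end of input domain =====

-- B replaces A's per-field linear argmin scan over the load array by a priority queue kept as a
-- lexicographically sorted pool of (load, machine) pairs (pop the front, ordered re-insert);
-- same greedy result, a genuinely different data structure (objective: alternative).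

-- ===== PORT A =====
-- f[k] for an assoc-list dict (first match); total form with default 0, exact when k is a key of f (Pre_)
def pvGetKey (f : List (String × Int)) (k : String) : Int :=
  ((f.find? (fun p => p.1 == k)).map Prod.snd).getD 0

-- field['width'] * field['height']
def pvArea (f : List (String × Int)) : Int := pvGetKey f "width" * pvGetKey f "height"

-- the body of A's greedy loop: pick the least-loaded machine by scanning range(machine_count)
def pvStepA (machine_count : Int)
    (st : List (List (List (String × Int))) × List Int) (field : List (String × Int)) :
    List (List (List (String × Int))) × List Int :=
  let j := (PySem.List.min? (PySem.List.pyRange 0 machine_count 1)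
              (fun i => PySem.List.pyGetD st.2 i 0)).getD 0
  (PySem.List.pySetD st.1 j (PySem.List.pyGetD st.1 j [] ++ [field]),
   PySem.List.pySetD st.2 j (PySem.List.pyGetD st.2 j 0 + pvArea field))

def optimize_field_assignment (fields : List (List (String × Int))) (machine_count : Int) :
    List (List (List (String × Int))) :=
  if (fields.length : Int) ≤ machine_count then
    (PySem.List.pyRange 0 machine_count 1).map (fun i =>
      if i < (fields.length : Int) then [PySem.List.pyGetD fields i []] else [])
  else
    ((PySem.List.sorted fields pvArea true).foldl (pvStepA machine_count)
      (List.replicate machine_count.toNat ([] : List (List (String × Int))),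
       List.replicate machine_count.toNat (0 : Int))).1

-- ===== PORT B =====
-- Python tuple comparison '<=' on (load, machine) pairs is lexicographic
def pvPairLe (a b : Int × Int) : Bool := a.1 < b.1 || (a.1 == b.1 && a.2 ≤ b.2)

-- B's insertion loop 'j = 0; while j < len(pool) and pool[j] <= entry: j += 1; pool.insert(j, entry)'
def pvIns (entry : Int × Int) : List (Int × Int) → List (Int × Int)
  | [] => [entry]
  | x :: t => if pvPairLe x entry then x :: pvIns entry t else entry :: x :: t

-- the body of B's greedy loop: pop the least-loaded machine from the front of the sorted pool
def pvStepB (st : List (List (List (String × Int))) × List (Int × Int))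
    (field : List (String × Int)) :
    List (List (List (String × Int))) × List (Int × Int) :=
  match st.2 with
  | [] => st   -- pool.pop(0) raises IndexError on an empty pool (machine_count ≤ 0; outside Pre_)
  | (load, i) :: rest =>
      (PySem.List.pySetD st.1 i (PySem.List.pyGetD st.1 i [] ++ [field]),
       pvIns (load + pvArea field, i) rest)

def optimize_field_assignment_alt (fields : List (List (String × Int))) (machine_count : Int) :
    List (List (List (String × Int))) :=
  if (fields.length : Int) ≤ machine_count then
    fields.map (fun f => [f]) ++ List.replicate (machine_count - fields.length).toNat []
  else
    ((PySem.List.sorted fields pvArea true).foldl pvStepB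
      (List.replicate machine_count.toNat ([] : List (List (String × Int))),
       (List.range machine_count.toNat).map (fun i : Nat => ((0 : Int), (i : Int))))).1

-- ===== PRECONDITION & SPEC =====
-- Pre_ excludes inputs where A raises — machine_count ≤ 0 with fields nonempty (ValueError: min of an
-- empty range; B raises IndexError there) and a field missing a "width"/"height" key when the greedy
-- branch runs (KeyError) — and, although A returns there, inputs whose absolute field areas sum to
-- 2^53 or more, where A's float load accumulator can round so A's machine choice is a float artefact.
def Pre_optimize_field_assignment (fields : List (List (String × Int))) (machine_count : Int) : Prop :=
  (fields.length : Int) ≤ machine_count ∨ fields = [] ∨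
    (0 < machine_count ∧
     (∀ f ∈ fields, ((f.map Prod.fst).contains "width" ∧ (f.map Prod.fst).contains "height")) ∧
     (fields.map (fun f => |pvArea f|)).sum < 2 ^ 53)
instance (fields : List (List (String × Int))) (machine_count : Int) :
    Decidable (Pre_optimize_field_assignment fields machine_count) := by
  unfold Pre_optimize_field_assignment; infer_instance

def pvWitness_optimize_field_assignment : (List (List (String × Int))) × Int :=
  ([[("width", 2), ("height", 3)], [("width", 1), ("height", 1)], [("width", 4), ("height", 1)]], 2)

def Spec_optimize_field_assignment (fields : List (List (String × Int))) (machine_count : Int) (out : List (List (List (String × Int)))) : Prop := out = optimize_field_assignment_alt fields machine_count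
instance (fields : List (List (String × Int))) (machine_count : Int) (out : List (List (List (String × Int)))) : Decidable (Spec_optimize_field_assignment fields machine_count out) := by unfold Spec_optimize_field_assignment; infer_instance

-- ===== CLAIM (what is proved, stated in full; the proofs are below) =====
def Claim_equal_optimize_field_assignment : Prop := ∀ (fields : List (List (String × Int))) (machine_count : Int), Dom_optimize_field_assignment fields machine_count → Pre_optimize_field_assignment fields machine_count → Spec_optimize_field_assignment fields machine_count (optimize_field_assignment fields machine_count)

-- ===== LEMMAS AND PROOFS =====

-- strict lexicographic order on (load, machine) pairs (proof-only)
def pvPairLt (a b : Int × Int) : Bool := a.1 < b.1 || (a.1 == b.1 && a.2 < b.2)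

-- (load, index) pairs of a load list, indices starting at k
def pvPairs : List Int → Int → List (Int × Int)
  | [], _ => []
  | v :: t, k => (v, k) :: pvPairs t (k + 1)

lemma pvPairs_length (l : List Int) (k : Int) : (pvPairs l k).length = l.length := by
  induction l generalizing k with
  | nil => rfl
  | cons v t ih => simp [pvPairs, ih]

lemma mem_pvPairs (l : List Int) (k : Int) (x : Int × Int) (hx : x ∈ pvPairs l k) :
    ∃ i : Nat, i < l.length ∧ x = (l.getD i 0, k + i) := by
  induction l generalizing k with
  | nil => simp [pvPairs] at hx
  | cons v t ih =>
      simp only [pvPairs, List.mem_cons] at hx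
      rcases hx with h | h
      · exact ⟨0, by simp, by simpa using h⟩
      · obtain ⟨i, hi, hx⟩ := ih (k + 1) h
        refine ⟨i + 1, by simpa using hi, ?_⟩
        rw [hx, List.getD_cons_succ]
        have he : k + ((i : Int) + 1) = k + 1 + i := by ring
        push_cast
        rw [he]

lemma pvPairs_mem (l : List Int) (k : Int) (i : Nat) (hi : i < l.length) :
    (l.getD i 0, k + i) ∈ pvPairs l k := by
  induction l generalizing k i with
  | nil => simp at hi
  | cons v t ih =>
      cases i with
      | zero => simp [pvPairs]
      | succ i =>
          have h1 := ih (k + 1) i (by simpa using hi)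
          have he : k + ((i : Int) + 1) = k + 1 + i := by ring
          simp only [pvPairs, List.mem_cons, List.getD_cons_succ]
          right
          push_cast
          rw [he]
          exact h1

lemma pvPairLt_iff (a b : Int × Int) :
    pvPairLt a b = true ↔ (a.1 < b.1 ∨ (a.1 = b.1 ∧ a.2 < b.2)) := by
  simp [pvPairLt]

lemma pvPairLe_iff (a b : Int × Int) :
    pvPairLe a b = true ↔ (a.1 < b.1 ∨ (a.1 = b.1 ∧ a.2 ≤ b.2)) := by
  simp [pvPairLe]

lemma pvPairLt_trans {a b c : Int × Int} (h1 : pvPairLt a b = true) (h2 : pvPairLt b c = true) :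
    pvPairLt a c = true := by
  rw [pvPairLt_iff] at *; omega

-- uniqueness of the lexicographic minimum of a list of pairs
lemma pvMin_unique {l : List (Int × Int)} {h c : Int × Int}
    (hhm : h ∈ l) (hh : ∀ y ∈ l, y = h ∨ pvPairLt h y = true)
    (hcm : c ∈ l) (hc : ∀ y ∈ l, y = c ∨ pvPairLt c y = true) : h = c := by
  rcases hh c hcm with h1 | h1
  · exact h1.symm
  · rcases hc h hhm with h2 | h2
    · exact h2
    · rw [pvPairLt_iff] at h1 h2; omega

-- members of pvIns
lemma mem_pvIns (e : Int × Int) (l : List (Int × Int)) (y : Int × Int) :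
    y ∈ pvIns e l ↔ y = e ∨ y ∈ l := by
  induction l with
  | nil => simp [pvIns]
  | cons x t ih =>
      by_cases h : pvPairLe x e = true
      · simp only [pvIns, h, if_pos, List.mem_cons, ih]; tauto
      · simp only [pvIns, h, if_neg, Bool.not_eq_true, List.mem_cons]

lemma pvIns_perm (e : Int × Int) (l : List (Int × Int)) : (pvIns e l).Perm (e :: l) := by
  induction l with
  | nil => simp [pvIns]
  | cons x t ih =>
      by_cases h : pvPairLe x e = true
      · simp only [pvIns, h, if_pos]
        exact (ih.cons x).trans (List.Perm.swap e x t)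
      · simp [pvIns, h]

lemma pvIns_pairwise (e : Int × Int) (l : List (Int × Int))
    (hs : l.Pairwise (fun a b => pvPairLt a b = true))
    (hne : ∀ x ∈ l, x.2 ≠ e.2) :
    (pvIns e l).Pairwise (fun a b => pvPairLt a b = true) := by
  induction l with
  | nil => simp [pvIns]
  | cons x t ih =>
      rw [List.pairwise_cons] at hs
      by_cases h : pvPairLe x e = true
      · have hxe : pvPairLt x e = true := by
          have := hne x (by simp)
          rw [pvPairLe_iff] at h; rw [pvPairLt_iff]; omega
        simp only [pvIns, h, if_pos, List.pairwise_cons]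
        refine ⟨?_, ih hs.2 (fun y hy => hne y (by simp [hy]))⟩
        intro y hy
        rcases (mem_pvIns e t y).1 hy with rfl | hy
        · exact hxe
        · exact hs.1 y hy
      · have hex : pvPairLt e x = true := by
          rw [pvPairLe_iff] at h; rw [pvPairLt_iff]; omega
        simp only [pvIns, h, if_neg, Bool.not_eq_true, List.pairwise_cons]
        refine ⟨?_, hs.1, hs.2⟩
        intro y hy
        rcases List.mem_cons.1 hy with h' | h'
        · rw [h']; exact hex
        · exact pvPairLt_trans hex (hs.1 y h')

-- the head of a lexicographically sorted pool is its minimum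
lemma head_min {h : Int × Int} {rest : List (Int × Int)}
    (hs : (h :: rest).Pairwise (fun a b => pvPairLt a b = true)) :
    ∀ y ∈ h :: rest, y = h ∨ pvPairLt h y = true := by
  rw [List.pairwise_cons] at hs
  intro y hy
  rcases List.mem_cons.1 hy with h' | h'
  · exact Or.inl h'
  · exact Or.inr (hs.1 y h')

-- min? of a list extended on the right, by the value of min? on the prefix
lemma pvMin?_append_none {α : Type} (f : α → Int) (xs : List α) (x : α)
    (hm : PySem.List.min? xs f = none) :
    PySem.List.min? (xs ++ [x]) f = some x := by
  unfold PySem.List.min? at *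
  rw [List.foldl_append, hm]
  rfl

lemma pvMin?_append_some {α : Type} (f : α → Int) (xs : List α) (x : α) (m : α)
    (hm : PySem.List.min? xs f = some m) :
    PySem.List.min? (xs ++ [x]) f = if f x < f m then some x else some m := by
  unfold PySem.List.min? at *
  rw [List.foldl_append, hm]
  rfl

-- min? over a 0-based range returns the FIRST index attaining the minimum
lemma pvMin?_range_first (f : Int → Int) (n : Nat) (j : Int)
    (h : PySem.List.min? (PySem.List.pyRange 0 (n : Int) 1) f = some j) :
    0 ≤ j ∧ j < (n : Int) ∧
      (∀ y : Int, 0 ≤ y → y < (n : Int) → f j ≤ f y ∧ (y < j → f j < f y)) := by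
  induction n generalizing j with
  | zero =>
      rw [PySem.List.pyRange_one_eq_nil (by simp)] at h
      simp [PySem.List.min?] at h
  | succ n ih =>
      have hr : PySem.List.pyRange 0 ((n + 1 : Nat) : Int) 1 =
          PySem.List.pyRange 0 (n : Int) 1 ++ [(n : Int)] := by
        push_cast
        exact PySem.List.pyRange_one_succ_right (by positivity)
      rw [hr] at h
      cases hm : PySem.List.min? (PySem.List.pyRange 0 (n : Int) 1) f with
      | none =>
          rw [pvMin?_append_none f _ _ hm] at h
          simp at h
          have hn : PySem.List.pyRange 0 (n : Int) 1 = [] :=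
            (PySem.List.min?_eq_none_iff _ _).1 hm
          have hn0 : n = 0 := by
            have := PySem.List.length_pyRange_one 0 (n : Int)
            rw [hn] at this
            simp at this
            omega
          subst hn0
          have hj : j = 0 := by omega
          subst hj
          refine ⟨le_refl 0, by norm_num, ?_⟩
          intro y hy0 hy1
          have hy : y = 0 := by omega
          subst hy
          exact ⟨le_refl _, by omega⟩
      | some m =>
          rw [pvMin?_append_some f _ _ _ hm] at h
          obtain ⟨hm0, hmn, hmy⟩ := ih m hm
          by_cases hlt : f (n : Int) < f m
          · rw [if_pos hlt] at h
            have hj : j = (n : Int) := by simpa using h.symm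
            subst hj
            refine ⟨by positivity, by push_cast; omega, ?_⟩
            intro y hy0 hy1
            push_cast at hy1
            by_cases hyn : y < (n : Int)
            · have h1 := hmy y hy0 hyn
              exact ⟨le_of_lt (lt_of_lt_of_le hlt h1.1), fun _ => lt_of_lt_of_le hlt h1.1⟩
            · have hy : y = (n : Int) := by omega
              subst hy
              exact ⟨le_refl _, by omega⟩
          · rw [if_neg hlt] at h
            have hj : j = m := by simpa using h.symm
            subst hj
            refine ⟨hm0, by push_cast; omega, ?_⟩
            intro y hy0 hy1
            push_cast at hy1
            by_cases hyn : y < (n : Int)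
            · exact hmy y hy0 hyn
            · have hy : y = (n : Int) := by omega
              subst hy
              exact ⟨not_lt.1 hlt, by omega⟩

-- decompose pvPairs at index j and the effect of List.set there
lemma pvPairs_set (l : List Int) (k : Int) (j : Nat) (v : Int) (hj : j < l.length) :
    ∃ pre suf, pvPairs l k = pre ++ (l.getD j 0, k + j) :: suf ∧
      pvPairs (l.set j v) k = pre ++ (v, k + j) :: suf ∧
      (∀ x ∈ pre, x.2 < k + j) ∧ (∀ x ∈ suf, k + j < x.2) := by
  induction l generalizing k j with
  | nil => simp at hj
  | cons a t ih =>
      cases j with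
      | zero =>
          refine ⟨[], pvPairs t (k + 1), by simp [pvPairs], by simp [pvPairs], by simp, ?_⟩
          intro x hx
          obtain ⟨i, _, hx⟩ := mem_pvPairs t (k + 1) x hx
          rw [hx]
          simp
          omega
      | succ j =>
          obtain ⟨pre, suf, h1, h2, h3, h4⟩ := ih (k + 1) j (by simpa using hj)
          have he : k + ((j : Int) + 1) = k + 1 + j := by ring
          refine ⟨(a, k) :: pre, suf, ?_, ?_, ?_, ?_⟩
          · simp only [pvPairs, List.getD_cons_succ, List.cons_append]
            push_cast
            rw [he, h1]
          · simp only [List.set, pvPairs, List.cons_append]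
            push_cast
            rw [he, h2]
          · intro x hx
            rcases List.mem_cons.1 hx with h' | h'
            · rw [h']; push_cast; omega
            · have := h3 x h'
              push_cast
              omega
          · intro x hx
            have := h4 x hx
            push_cast
            omega

-- the greedy loops of A and B compute the same assignment lists
lemma pvLoop (mc : Int) (hmc : 0 < mc) :
    ∀ (fs : List (List (String × Int))) (loads : List Int) (pool : List (Int × Int))
      (asg : List (List (List (String × Int)))),
      loads.length = mc.toNat →
      pool.Pairwise (fun a b => pvPairLt a b = true) →
      pool.Perm (pvPairs loads 0) →
      (fs.foldl (pvStepA mc) (asg, loads)).1 = (fs.foldl pvStepB (asg, pool)).1 := by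
  intro fs
  induction fs with
  | nil => intro loads pool asg _ _ _; rfl
  | cons field fs ih =>
      intro loads pool asg hlen hsorted hperm
      have hplen : pool.length = loads.length := by
        rw [hperm.length_eq, pvPairs_length]
      have hpool_ne : pool ≠ [] := by
        intro hnil
        rw [hnil] at hplen
        simp at hplen
        omega
      obtain ⟨⟨load, i⟩, rest, rfl⟩ : ∃ h t, pool = h :: t := by
        cases pool with
        | nil => exact absurd rfl hpool_ne
        | cons h t => exact ⟨h, t, rfl⟩
      have hrange_ne : PySem.List.pyRange 0 mc 1 ≠ [] := by
        intro hn
        have hL := PySem.List.length_pyRange_one 0 mc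
        rw [hn] at hL
        simp at hL
        omega
      obtain ⟨jA, hjA⟩ : ∃ j, PySem.List.min? (PySem.List.pyRange 0 mc 1)
          (fun i => PySem.List.pyGetD loads i 0) = some j := by
        cases hc : PySem.List.min? (PySem.List.pyRange 0 mc 1)
            (fun i => PySem.List.pyGetD loads i 0) with
        | none => exact absurd ((PySem.List.min?_eq_none_iff _ _).1 hc) hrange_ne
        | some j => exact ⟨j, rfl⟩
      have hmc_cast : ((mc.toNat : Nat) : Int) = mc := Int.toNat_of_nonneg (le_of_lt hmc)
      obtain ⟨hj0, hjlt, hjmin⟩ :=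
        pvMin?_range_first (fun i => PySem.List.pyGetD loads i 0) mc.toNat jA
          (by rw [hmc_cast]; exact hjA)
      rw [hmc_cast] at hjlt hjmin
      set jn := jA.toNat with hjn
      have hjA_cast : ((jn : Nat) : Int) = jA := Int.toNat_of_nonneg hj0
      have hjn_lt : jn < loads.length := by omega
      have e1 : PySem.List.pyGetD loads jA 0 = loads.getD jn 0 := by
        rw [← hjA_cast, PySem.List.pyGetD_natCast]
      set c : Int × Int := (loads.getD jn 0, (jn : Int)) with hc
      have hcmem : c ∈ pvPairs loads 0 := by
        simpa using pvPairs_mem loads 0 jn hjn_lt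
      have hcmin : ∀ y ∈ pvPairs loads 0, y = c ∨ pvPairLt c y = true := by
        intro y hy
        obtain ⟨i', hi', hy⟩ := mem_pvPairs loads 0 y hy
        by_cases hii : i' = jn
        · left
          rw [hy, hii, hc]
          simp
        · right
          have hi'mc : (i' : Int) < mc := by omega
          have hle := hjmin (i' : Int) (Int.natCast_nonneg _) hi'mc
          simp only [e1, PySem.List.pyGetD_natCast] at hle
          rw [pvPairLt_iff, hy, hc]
          simp only [zero_add]
          by_cases hlt2 : loads.getD jn 0 < loads.getD i' 0
          · exact Or.inl hlt2
          · have heq : loads.getD jn 0 = loads.getD i' 0 := le_antisymm hle.1 (not_lt.1 hlt2)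
            have hji : jA < (i' : Int) := by
              rcases lt_trichotomy ((i' : Int)) jA with hlt | hEq | hgt
              · exact absurd (hle.2 hlt) (by omega)
              · exact absurd (by rw [← hjA_cast] at hEq; exact_mod_cast hEq) hii
              · exact hgt
            exact Or.inr ⟨heq, by omega⟩
      have hhmem : (load, i) ∈ pvPairs loads 0 := (hperm.mem_iff).1 (by simp)
      have hhmin : ∀ y ∈ pvPairs loads 0, y = (load, i) ∨ pvPairLt (load, i) y = true := by
        intro y hy
        exact head_min hsorted y ((hperm.mem_iff).2 hy)
      have hhc : (load, i) = c := pvMin_unique hhmem hhmin hcmem hcmin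
      have hload : load = loads.getD jn 0 := congrArg Prod.fst hhc
      have hi : i = jA := by
        have := congrArg Prod.snd hhc
        simp only [hc] at this
        rw [this, hjA_cast]
      rw [List.foldl_cons, List.foldl_cons]
      have hstepA : pvStepA mc (asg, loads) field =
          (PySem.List.pySetD asg jA (PySem.List.pyGetD asg jA [] ++ [field]),
           loads.set jn (loads.getD jn 0 + pvArea field)) := by
        simp only [pvStepA, hjA, Option.getD_some]
        rw [← hjA_cast]
        simp
      have hstepB : pvStepB (asg, (load, i) :: rest) field =
          (PySem.List.pySetD asg jA (PySem.List.pyGetD asg jA [] ++ [field]),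
           pvIns (loads.getD jn 0 + pvArea field, (jn : Int)) rest) := by
        simp only [pvStepB, hload, hi, hjA_cast]
      rw [hstepA, hstepB]
      obtain ⟨pre, suf, hP1, hP2, hpre, hsuf⟩ :=
        pvPairs_set loads 0 jn (loads.getD jn 0 + pvArea field) hjn_lt
      simp only [zero_add] at hP1 hP2 hpre hsuf
      have hrest : rest.Perm (pre ++ suf) := by
        have h1 : (c :: rest).Perm (pre ++ c :: suf) := by
          rw [← hP1]
          have : (load, i) :: rest = c :: rest := by rw [hhc]
          rw [← this]
          exact hperm
        exact ((h1.trans List.perm_middle).cons_inv)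
      have hperm' : (pvIns (loads.getD jn 0 + pvArea field, (jn : Int)) rest).Perm
          (pvPairs (loads.set jn (loads.getD jn 0 + pvArea field)) 0) := by
        refine ((pvIns_perm _ _).trans (hrest.cons _)).trans ?_
        rw [hP2]
        exact List.perm_middle.symm
      have hsorted' : (pvIns (loads.getD jn 0 + pvArea field, (jn : Int)) rest).Pairwise
          (fun a b => pvPairLt a b = true) := by
        refine pvIns_pairwise _ _ (List.Pairwise.of_cons hsorted) ?_
        intro x hx
        have hx' : x ∈ pre ++ suf := hrest.mem_iff.1 hx
        rcases List.mem_append.1 hx' with h' | h'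
        · have := hpre x h'
          simp only []
          omega
        · have := hsuf x h'
          simp only []
          omega
      exact ih (loads.set jn (loads.getD jn 0 + pvArea field))
        (pvIns (loads.getD jn 0 + pvArea field, (jn : Int)) rest) _
        (by rw [List.length_set]; exact hlen) hsorted' hperm'

-- the dedicated-machine branch: A's range comprehension equals B's map-and-pad
lemma pvBranch1 (fields : List (List (String × Int))) (mc : Int)
    (h : (fields.length : Int) ≤ mc) :
    (PySem.List.pyRange 0 mc 1).map (fun i =>
        if i < (fields.length : Int) then [PySem.List.pyGetD fields i []] else []) =
      fields.map (fun f => [f]) ++ List.replicate (mc - fields.length).toNat [] := by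
  have h0 : (0 : Int) ≤ (fields.length : Int) := Int.natCast_nonneg _
  rw [PySem.List.pyRange_one_append 0 (fields.length : Int) mc h0 h, List.map_append]
  congr 1
  · rw [List.map_congr_left (g := fun i => [PySem.List.pyGetD fields i ([] : List (String × Int))])]
    · rw [show (fun i => [PySem.List.pyGetD fields i ([] : List (String × Int))]) =
          (fun x => [x]) ∘ (fun i => PySem.List.pyGetD fields i ([] : List (String × Int))) from rfl,
        ← List.map_map, PySem.List.map_pyGetD_pyRange_zero']
    · intro i hi
      rw [PySem.List.mem_pyRange_one] at hi
      simp [hi.2]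
  · rw [List.map_congr_left (g := fun _ => ([] : List (List (String × Int))))]
    · rw [List.map_const', PySem.List.length_pyRange_one]
    · intro i hi
      rw [PySem.List.mem_pyRange_one] at hi
      simp
      omega

-- the initial pool is the pair list of the all-zero load list
lemma pvPairs_replicate (m : Nat) (k : Int) :
    pvPairs (List.replicate m (0 : Int)) k = (List.range m).map (fun i : Nat => ((0 : Int), k + (i : Int))) := by
  induction m generalizing k with
  | zero => rfl
  | succ m ih =>
      rw [List.replicate_succ, List.range_succ_eq_map, List.map_cons]
      simp only [pvPairs, ih, List.map_map]
      refine congrArg₂ _ (by simp) ?_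
      refine List.map_congr_left (fun i _ => ?_)
      simp only [Function.comp_apply]
      refine congrArg₂ _ rfl ?_
      push_cast
      ring

lemma pvInitPerm (m : Nat) :
    ((List.range m).map (fun i : Nat => ((0 : Int), (i : Int)))) = pvPairs (List.replicate m 0) 0 := by
  rw [pvPairs_replicate m 0]
  exact List.map_congr_left (fun i _ => by simp)

lemma pvInitPairwise (m : Nat) :
    ((List.range m).map (fun i : Nat => ((0 : Int), (i : Int)))).Pairwise
      (fun a b => pvPairLt a b = true) := by
  rw [List.pairwise_map]
  refine (List.pairwise_lt_range).imp ?_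
  intro a b hab
  rw [pvPairLt_iff]
  right
  exact ⟨rfl, by simpa using (Int.ofNat_lt.2 hab)⟩

theorem optimize_field_assignment_spec : Claim_equal_optimize_field_assignment := by
  intro fields mc _dom hpre
  unfold Spec_optimize_field_assignment
  unfold optimize_field_assignment optimize_field_assignment_alt
  by_cases hb : (fields.length : Int) ≤ mc
  · rw [if_pos hb, if_pos hb]
    exact pvBranch1 fields mc hb
  · rw [if_neg hb, if_neg hb]
    rcases hpre with h | h | h
    · exact absurd h hb
    · subst h
      have hs : PySem.List.sorted ([] : List (List (String × Int))) pvArea true = [] :=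
        (PySem.List.sorted_eq_nil_iff _ _ _).2 rfl
      rw [hs]
      rfl
    · obtain ⟨hmc, -, -⟩ := h
      refine pvLoop mc hmc (PySem.List.sorted fields pvArea true)
        (List.replicate mc.toNat 0)
        ((List.range mc.toNat).map (fun i : Nat => ((0 : Int), (i : Int))))
        (List.replicate mc.toNat [])
        (by simp) (pvInitPairwise mc.toNat) ?_
      rw [pvInitPerm]
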